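-- pv_equiv track=rewrite | github.com/JayBhatt2021/python-basics-ii | src/section1/ListOperations.py | longest_positive_continuous_length
-- ===== SOURCE A (Python) =====
-- from typing import List
--
-- def longest_positive_continuous_length(num_list: List[int]) -> int:
--     """Find the length of the longest continuous series of positive numbers in a
--     list.
--
--     :param num_list: The list of numbers.
--     :return: The length of the longest continuous series of positive numbers.
--     """
--     length, longest_length = 0, 0
--
--     for num in num_list:
--         if num > 0:
--             length += 1
--         else:
--             # If the current series is longer than the longest recorded series,
--             # update the longest length
--             if length > longest_length:
--                 longest_length = length
--
--             length = 0
--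
--     # If the last positive series is the longest, update the longest length
--     if length > longest_length:
--         longest_length = length
--
--     return longest_length
-- ===== SOURCE B (Python) =====
-- from itertools import groupby
-- from typing import List
--
--
-- def longest_positive_continuous_length(num_list: List[int]) -> int:
--     """Length of the longest run of consecutive positive numbers."""
--     return max(
--         (sum(1 for _ in g) for k, g in groupby(num_list, key=lambda x: x > 0) if k),
--         default=0,
--     )
-- ===== Notes on version B (the rewrite author's own statement) =====
-- stated objective: idiomatic
-- what changed: Replaced the running counter with explicit reset and post-loop flush by an itertools.groupby group-then-aggregate pass: split into maximal runs keyed by x>0, take the lengths of the positive runs, and max them with default=0.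
import Mathlib
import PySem

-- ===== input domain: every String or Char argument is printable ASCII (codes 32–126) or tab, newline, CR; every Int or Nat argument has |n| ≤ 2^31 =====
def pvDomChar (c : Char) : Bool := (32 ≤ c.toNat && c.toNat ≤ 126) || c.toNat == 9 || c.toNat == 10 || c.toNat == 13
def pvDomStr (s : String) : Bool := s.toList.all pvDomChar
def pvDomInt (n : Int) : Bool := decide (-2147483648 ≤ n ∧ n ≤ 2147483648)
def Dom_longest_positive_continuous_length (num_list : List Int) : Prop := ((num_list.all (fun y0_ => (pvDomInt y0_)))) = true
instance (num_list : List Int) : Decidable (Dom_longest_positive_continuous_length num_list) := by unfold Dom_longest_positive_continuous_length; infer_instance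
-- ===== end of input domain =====

-- B replaces A's running counter/reset loop with a group-then-aggregate pass (idiomatic; same O(n) cost).

-- ===== PORT A =====
def longest_positive_continuous_length (num_list : List Int) : Int :=
  let s := num_list.foldl
    (fun (st : Int × Int) num =>
      if num > 0 then (st.1 + 1, st.2)
      else (0, if st.1 > st.2 then st.1 else st.2))
    (0, 0)
  if s.1 > s.2 then s.1 else s.2

-- ===== PORT B =====
-- itertools.groupby(num_list, key=lambda x: x > 0), each group carried as (key, count)
-- (count = sum(1 for _ in g)); built by structural recursion, merging into the current
-- front group exactly as groupby delimits maximal runs.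
def pvGroups : List Int → List (Bool × Int)
  | [] => []
  | x :: xs =>
    match pvGroups xs with
    | [] => [(decide (x > 0), 1)]
    | (k, c) :: rest =>
      if decide (x > 0) == k then (k, c + 1) :: rest
      else (decide (x > 0), 1) :: (k, c) :: rest

-- max(<lengths of groups with key True>, default=0)
def longest_positive_continuous_length_alt (num_list : List Int) : Int :=
  ((pvGroups num_list).filter (fun g => g.1)).foldr (fun g acc => max g.2 acc) 0

-- ===== PRECONDITION & SPEC =====
def Spec_longest_positive_continuous_length (num_list : List Int) (out : Int) : Prop := out = longest_positive_continuous_length_alt num_list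
instance (num_list : List Int) (out : Int) : Decidable (Spec_longest_positive_continuous_length num_list out) := by unfold Spec_longest_positive_continuous_length; infer_instance

-- ===== CLAIM (what is proved, stated in full; the proofs are below) =====
def Claim_equal_longest_positive_continuous_length : Prop := ∀ (num_list : List Int), Dom_longest_positive_continuous_length num_list → Spec_longest_positive_continuous_length num_list (longest_positive_continuous_length num_list)

-- ===== LEMMAS AND PROOFS =====

-- (length of the positive prefix run, the answer) by structural recursion; proof helper only.
def pvRun : List Int → Int × Int
  | [] => (0, 0)
  | x :: xs =>
    let r := pvRun xs
    if x > 0 then (r.1 + 1, max (r.1 + 1) r.2) else (0, r.2)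

def pvF (G : List (Bool × Int)) : Int :=
  (G.filter (fun g => g.1)).foldr (fun g acc => max g.2 acc) 0

def pvPT : List (Bool × Int) → Int
  | (true, c) :: _ => c
  | _ => 0

lemma pvRun_nonneg : ∀ l : List Int, 0 ≤ (pvRun l).1 ∧ (pvRun l).1 ≤ (pvRun l).2 ∧ 0 ≤ (pvRun l).2 := by
  intro l
  induction l with
  | nil => simp [pvRun]
  | cons x xs ih =>
    simp only [pvRun]
    split_ifs <;> simp <;> omega

lemma pvGroups_spec : ∀ l : List Int,
    pvF (pvGroups l) = (pvRun l).2 ∧ pvPT (pvGroups l) = (pvRun l).1 := by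
  intro l
  induction l with
  | nil => simp [pvGroups, pvRun, pvF, pvPT]
  | cons x xs ih =>
    obtain ⟨ihF, ihP⟩ := ih
    have hx := pvRun_nonneg xs
    simp only [pvGroups, pvRun]
    rcases hg : pvGroups xs with _ | ⟨⟨k, c⟩, rest⟩
    · -- pvGroups xs = [] : then pvF/pvPT of xs are 0
      rw [hg] at ihF ihP
      simp [pvF, pvPT] at ihF ihP
      by_cases h : x > 0 <;> simp [h, pvF, pvPT, ← ihF, ← ihP]
    · rw [hg] at ihF ihP
      by_cases h : x > 0
      · cases k with
        | true =>
          simp [pvPT] at ihP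
          simp [pvF] at ihF
          simp [h, pvF, pvPT, ← ihF, ← ihP]
          omega
        | false =>
          simp [pvPT] at ihP
          simp [pvF] at ihF
          simp [h, pvF, pvPT, ← ihF, ← ihP]
      · cases k with
        | true =>
          simp [pvF] at ihF
          simp [h, pvF, pvPT, ← ihF]
        | false =>
          simp [pvF] at ihF
          simp [h, pvF, pvPT, ← ihF]

lemma foldlA_spec : ∀ (l : List Int) (len long : Int), 0 ≤ len →
    (let s := l.foldl
        (fun (st : Int × Int) num =>
          if num > 0 then (st.1 + 1, st.2)
          else (0, if st.1 > st.2 then st.1 else st.2))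
        (len, long);
      if s.1 > s.2 then s.1 else s.2)
      = max long (max (len + (pvRun l).1) (pvRun l).2) := by
  intro l
  induction l with
  | nil => intro len long h; simp [pvRun]; omega
  | cons x xs ih =>
    intro len long h
    have hx := pvRun_nonneg xs
    by_cases hp : x > 0
    · have := ih (len + 1) long (by omega)
      simp only [List.foldl_cons, if_pos hp] at this ⊢
      rw [this]
      simp [pvRun, hp]
      omega
    · have := ih 0 (if len > long then len else long) (by omega)
      simp only [List.foldl_cons, if_neg hp] at this ⊢
      rw [this]
      simp [pvRun, hp]
      split_ifs <;> omega

-- ===== VERDICT (by name: the statement is the Claim_ definition above) =====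
theorem longest_positive_continuous_length_spec : Claim_equal_longest_positive_continuous_length := by
  intro num_list _
  unfold Spec_longest_positive_continuous_length
  unfold longest_positive_continuous_length longest_positive_continuous_length_alt
  have hA := foldlA_spec num_list 0 0 le_rfl
  have hB := pvGroups_spec num_list
  have hx := pvRun_nonneg num_list
  simp only at hA
  rw [hA]
  show max 0 (max (0 + (pvRun num_list).1) (pvRun num_list).2) = pvF (pvGroups num_list)
  rw [hB.1]
  omega
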